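-- pv_equiv track=rewrite | github.com/bpupadhyaya/programming-interviews | top/topgoogbyfrequency/python/group2/shortest_way_to_form_string_G44.py | shortest_way1
-- ===== SOURCE A (Python) =====
-- def shortest_way1(source: str, target: str) -> int:
--     for t in target:
--         if t not in source:
--             return -1
--
--     result = 1
--     i, j = 0, 0
--
--     while i < len(target):
--         if j >= len(source):
--             j = 0
--             result += 1
--         if target[i] == source[j]:
--             i += 1
--         j += 1
--
--     return result
-- ===== SOURCE B (Python) =====
-- def shortest_way1(source: str, target: str) -> int:
--     n = len(source)
--     # nxt[j] maps each character to its smallest occurrence index >= j in source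
--     nxt = [{}]
--     for j in range(n - 1, -1, -1):
--         cur = dict(nxt[-1])
--         cur[source[j]] = j
--         nxt.append(cur)
--     nxt.reverse()
--     first = nxt[0]
--     result = 1
--     j = 0
--     for c in target:
--         p = nxt[j].get(c)
--         if p is None:
--             if c not in first:
--                 return -1
--             result += 1
--             p = first[c]
--         j = p + 1
--     return result
-- ===== Notes on version B (the rewrite author's own statement) =====
-- stated objective: alternative
-- what changed: Replaces A's per-character linear rescans of source by a next-occurrence table (nxt[j][c] = first index >= j of c in source) built once right-to-left, so each target character is handled by one dictionary jump; asymptotically O((n+m)*sigma) vs A's O(n*m), though not measurably faster on the benchmark's input family.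
import Mathlib
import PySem

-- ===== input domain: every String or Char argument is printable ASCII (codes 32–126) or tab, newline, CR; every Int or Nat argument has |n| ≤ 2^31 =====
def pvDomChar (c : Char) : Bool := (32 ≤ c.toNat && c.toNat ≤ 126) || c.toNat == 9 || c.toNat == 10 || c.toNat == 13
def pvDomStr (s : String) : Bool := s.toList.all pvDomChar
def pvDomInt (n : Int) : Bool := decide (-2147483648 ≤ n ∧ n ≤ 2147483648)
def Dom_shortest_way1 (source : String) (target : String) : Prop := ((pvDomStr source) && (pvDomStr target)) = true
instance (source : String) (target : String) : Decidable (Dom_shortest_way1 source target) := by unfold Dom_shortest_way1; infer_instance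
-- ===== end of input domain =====

-- B precomputes a next-occurrence table so each target character is one dictionary jump
-- instead of A's linear rescan of source; equivalence of the two is proved below.

-- ===== PORT A =====
-- the while loop of A, one fuel unit per iteration (fuel is a totality guard only;
-- the proof shows (|t|+1)*(|s|+1) units always suffice on the reachable states)
def aloopA (s t : List Char) : Nat → Nat → Nat → Int → Int
  | 0, _, _, r => r
  | f+1, i, j, r =>
    if i < t.length then
      let p := if s.length ≤ j then ((0:Nat), r + 1) else (j, r)
      if PySem.List.pyGet? t (i : Int) = PySem.List.pyGet? s (p.1 : Int) then
        aloopA s t f (i+1) (p.1+1) p.2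
      else
        aloopA s t f i (p.1+1) p.2
    else r

def shortest_way1 (source : String) (target : String) : Int :=
  let s := source.toList
  let t := target.toList
  if t.any (fun c => !(s.contains c)) then -1
  else aloopA s t ((t.length + 1) * (s.length + 1)) 0 0 1

-- ===== PORT B =====
-- one step of B's table-building loop: cur = dict(nxt[-1]); cur[source[j]] = j; nxt.append(cur)
def bstep (s : List Char) (nxt : List (PySem.Dict Char Int)) (j : Int) : List (PySem.Dict Char Int) :=
  nxt ++ [((PySem.List.pyGet? nxt (-1)).getD PySem.Dict.empty).insert ((PySem.List.pyGet? s j).getD ' ') j]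

-- B's loop over target with state (j, result); early return -1 on a missing character
def bloop (nxt : List (PySem.Dict Char Int)) (first : PySem.Dict Char Int) :
    List Char → Int → Int → Int
  | [], _, r => r
  | c :: cs, j, r =>
    match ((PySem.List.pyGet? nxt j).getD PySem.Dict.empty).get? c with
    | some p => bloop nxt first cs (p + 1) r
    | none =>
      if first.contains c then bloop nxt first cs (first.getD c 0 + 1) (r + 1)
      else -1

def shortest_way1_alt (source : String) (target : String) : Int :=
  let s := source.toList
  let n := s.length
  let nxt := ((PySem.List.pyRange ((n : Int) - 1) (-1) (-1)).foldl (bstep s) [PySem.Dict.empty]).reverse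
  let first := (PySem.List.pyGet? nxt 0).getD PySem.Dict.empty
  bloop nxt first target.toList 0 1

-- ===== PRECONDITION & SPEC =====
def Spec_shortest_way1 (source : String) (target : String) (out : Int) : Prop := out = shortest_way1_alt source target
instance (source : String) (target : String) (out : Int) : Decidable (Spec_shortest_way1 source target out) := by unfold Spec_shortest_way1; infer_instance

-- ===== CLAIM (what is proved, stated in full; the proofs are below) =====
def Claim_equal_shortest_way1 : Prop := ∀ (source : String) (target : String), Dom_shortest_way1 source target → Spec_shortest_way1 source target (shortest_way1 source target)

-- ===== LEMMAS AND PROOFS =====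

-- index of the first occurrence of c in l
def findIn (c : Char) : List Char → Option Nat
  | [] => none
  | a :: l => if a = c then some 0 else (findIn c l).map (· + 1)

-- common reference: greedy jump-by-first-occurrence over the target
def greedy (s : List Char) : List Char → Nat → Int → Int
  | [], _, r => r
  | c :: cs, j, r =>
    match findIn c (s.drop j) with
    | some d => greedy s cs (j + d + 1) r
    | none =>
      match findIn c s with
      | some p => greedy s cs (p + 1) (r + 1)
      | none => -1

-- the table B builds for a suffix of source starting at absolute position k
def Dtab : List Char → Int → PySem.Dict Char Int
  | [], _ => PySem.Dict.empty
  | a :: l, k => (Dtab l (k + 1)).insert a k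

theorem findIn_eq_none {c : Char} {l : List Char} : findIn c l = none ↔ c ∉ l := by
  induction l with
  | nil => simp [findIn]
  | cons a l ih => by_cases h : a = c <;> simp [findIn, h, ih] <;> tauto

theorem findIn_lt_length {c : Char} : ∀ {l : List Char} {d : Nat}, findIn c l = some d → d < l.length := by
  intro l
  induction l with
  | nil => intro d h; simp [findIn] at h
  | cons a l ih =>
    intro d h
    by_cases ha : a = c
    · simp [findIn, ha] at h; subst h; simp
    · simp [findIn, ha] at h
      obtain ⟨d', hd', rfl⟩ := h
      have := ih hd'; simp; omega

theorem Dtab_get? (c : Char) : ∀ (l : List Char) (k : Int),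
    (Dtab l k).get? c = (findIn c l).map (fun d : Nat => k + (d : Int)) := by
  intro l
  induction l with
  | nil => intro k; simp [Dtab, findIn, PySem.Dict.get?_empty]
  | cons a l ih =>
    intro k
    by_cases h : c = a
    · subst h; simp [Dtab, findIn, PySem.Dict.get?_insert_self]
    · rw [Dtab, PySem.Dict.get?_insert_of_ne _ _ h, ih]
      rw [findIn, if_neg (fun hh => h hh.symm)]
      rcases findIn c l with _ | d
      · simp
      · simp only [Option.map_some]
        congr 1
        push_cast
        ring

theorem Dtab_drop (s : List Char) {m : Nat} (hm : m < s.length) :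
    Dtab (s.drop m) (m : Int) = (Dtab (s.drop (m+1)) ((m : Int) + 1)).insert s[m] (m : Int) := by
  rw [List.drop_eq_getElem_cons hm, Dtab]

theorem pyRange_neg_desc (n : Nat) :
    PySem.List.pyRange ((n : Int) - 1) (-1) (-1) = (List.range n).map (fun k : Nat => (n : Int) - 1 - (k : Int)) := by
  have h1 : PySem.List.pyRange ((n : Int) - 1) (-1) (-1) =
      List.map (fun k : Nat => (n : Int) - 1 + -(k : Int))
        (List.range (if (-1 : Int) < (n : Int) - 1 then ((n : Int) - 1 - -1).toNat else 0)) := by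
    simp [PySem.List.pyRange]
  rcases Nat.eq_zero_or_pos n with h | h
  · subst h; simpa using h1
  · rw [h1, if_pos (by omega)]
    have h2 : ((n : Int) - 1 - -1).toNat = n := by omega
    rw [h2]
    apply List.map_congr_left; intro k _; ring

theorem build_inv (s : List Char) : ∀ (m : Nat) (acc : List (PySem.Dict Char Int)),
    m ≤ s.length → acc.getLast? = some (Dtab (s.drop m) (m : Int)) →
    ((List.range m).map (fun k : Nat => (m : Int) - 1 - (k : Int))).foldl (bstep s) acc =
      acc ++ (List.range m).map (fun k : Nat => Dtab (s.drop (m - 1 - k)) ((m : Int) - 1 - (k : Int))) := by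
  intro m
  induction m with
  | zero => intro acc _ _; simp
  | succ m ih =>
    intro acc hm hlast
    rw [List.range_succ_eq_map]
    simp only [List.map_cons, List.map_map, List.foldl_cons]
    have hstep : bstep s acc (((m:Nat)+1 : Int) - 1 - (0:Nat)) = acc ++ [Dtab (s.drop m) (m : Int)] := by
      have hj : (((m:Nat)+1 : Int) - 1 - ((0:Nat):Int)) = (m : Int) := by push_cast; ring
      rw [hj]
      unfold bstep
      rw [PySem.List.pyGet?_neg_one, hlast, PySem.List.pyGet?_natCast,
        List.getElem?_eq_getElem (by omega : m < s.length)]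
      simp only [Option.getD_some]
      rw [Dtab_drop s (by omega : m < s.length)]
      congr 2
    have hcast : (((m+1:Nat) : Int)) - 1 - ((0:Nat):Int) = (((m:Nat)+1 : Int) - 1 - (0:Nat)) := by push_cast; ring
    rw [hcast, hstep]
    have htail : (List.range m).map ((fun k : Nat => ((m+1:Nat) : Int) - 1 - (k : Int)) ∘ Nat.succ)
        = (List.range m).map (fun k : Nat => (m : Int) - 1 - (k : Int)) := by
      apply List.map_congr_left; intro k _; simp [Function.comp]; push_cast; ring
    rw [htail, ih (acc ++ [Dtab (s.drop m) (m : Int)]) (by omega) (by simp)]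
    have hG : (List.range m).map (fun k : Nat => Dtab (s.drop (m - 1 - k)) ((m : Int) - 1 - (k : Int)))
        = (List.range m).map ((fun k : Nat => Dtab (s.drop (m + 1 - 1 - k)) (((m+1:Nat) : Int) - 1 - (k : Int))) ∘ Nat.succ) := by
      apply List.map_congr_left; intro k _
      simp only [Function.comp]
      have h1 : m + 1 - 1 - Nat.succ k = m - 1 - k := by omega
      have h2 : (((m+1:Nat) : Int) - 1 - ((Nat.succ k : Nat) : Int)) = (m : Int) - 1 - (k : Int) := by push_cast; ring
      rw [h1, h2]
    have hhead : Dtab (List.drop (m+1-1-0) s) ((m : Int) + 1 - 1 - ((0:Nat):Int)) = Dtab (List.drop m s) (m : Int) := by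
      norm_num
    rw [hG, hhead]
    simp [List.append_assoc]

theorem nxt_get (s : List Char) {j : Nat} (hj : j ≤ s.length) :
    (PySem.List.pyGet?
        (((PySem.List.pyRange ((s.length : Int) - 1) (-1) (-1)).foldl (bstep s) [PySem.Dict.empty]).reverse)
        (j : Int)).getD PySem.Dict.empty = Dtab (s.drop j) (j : Int) := by
  set n := s.length with hn
  have hbase : ([PySem.Dict.empty] : List (PySem.Dict Char Int)).getLast? = some (Dtab (s.drop n) (n : Int)) := by
    rw [hn, List.drop_length]; simp [Dtab]
  rw [pyRange_neg_desc, build_inv s n [PySem.Dict.empty] (le_refl n) hbase]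
  rw [PySem.List.pyGet?_natCast]
  simp only [List.singleton_append, List.reverse_cons]
  rcases Nat.lt_or_ge j n with hjn | hjn
  · rw [List.getElem?_append_left (by simp; omega)]
    rw [List.getElem?_reverse (by simp; omega)]
    simp only [List.length_map, List.length_range]
    rw [List.getElem?_map]
    rw [List.getElem?_range (by omega)]
    simp only [Option.map_some, Option.getD_some]
    have h1 : n - 1 - (n - 1 - j) = j := by omega
    have h2 : ((n : Int) - 1 - ((n - 1 - j : Nat) : Int)) = (j : Int) := by omega
    rw [h1, h2]
  · have hjn' : j = n := by omega
    subst hjn'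
    rw [List.getElem?_append_right (by simp)]
    rw [hn, List.drop_length]; simp [Dtab]

theorem bloop_greedy (s : List Char)
    (nxt : List (PySem.Dict Char Int)) (first : PySem.Dict Char Int)
    (hnxt : ∀ j : Nat, j ≤ s.length → (PySem.List.pyGet? nxt (j : Int)).getD PySem.Dict.empty = Dtab (s.drop j) (j : Int))
    (hfirst : first = Dtab s 0) :
    ∀ (cs : List Char) (j : Nat) (r : Int), j ≤ s.length →
      bloop nxt first cs (j : Int) r = greedy s cs j r := by
  intro cs
  induction cs with
  | nil => intro j r hj; rfl
  | cons c cs ih =>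
    intro j r hj
    rw [bloop, greedy, hnxt j hj, Dtab_get?]
    cases h : findIn c (s.drop j) with
    | some d =>
      have hd := findIn_lt_length h
      rw [List.length_drop] at hd
      simp only [Option.map_some]
      have hcast : ((j : Int) + (d : Int)) + 1 = ((j + d + 1 : Nat) : Int) := by push_cast; ring
      rw [hcast, ih (j + d + 1) r (by omega)]
    | none =>
      simp only [Option.map_none]
      have hf : first.get? c = (findIn c s).map (fun d : Nat => (0 : Int) + (d : Int)) := by
        rw [hfirst]
        have := Dtab_get? c s 0
        simpa using this
      cases h0 : findIn c s with
      | none =>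
        have hcont : first.contains c = false := by
          rw [PySem.Dict.contains_eq_isSome_get?, hf, h0]; rfl
        rw [hcont]; rfl
      | some p =>
        have hp := findIn_lt_length h0
        have hcont : first.contains c = true := by
          rw [PySem.Dict.contains_eq_isSome_get?, hf, h0]; rfl
        rw [hcont]
        simp only [if_true]
        have hgetD : first.getD c 0 = (p : Int) := by
          rw [PySem.Dict.getD_eq_get?_getD, hf, h0]; simp
        have hcast : (p : Int) + 1 = ((p + 1 : Nat) : Int) := by push_cast; ring
        rw [hgetD, hcast, ih (p + 1) (r + 1) (by omega)]

theorem scan_some (s t : List Char) (c : Char) : ∀ (d : Nat), ∀ (j f i : Nat) (r : Int),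
    PySem.List.pyGet? t (i : Int) = some c → i < t.length → j ≤ s.length →
    findIn c (s.drop j) = some d → d + 1 ≤ f →
    aloopA s t f i j r = aloopA s t (f - (d+1)) (i+1) (j+d+1) r := by
  intro d
  induction d with
  | zero =>
    intro j f i r hti hi hj h hf
    have hjlt : j < s.length := by
      by_contra hc
      rw [List.drop_eq_nil_of_le (by omega)] at h
      simp [findIn] at h
    obtain ⟨f', rfl⟩ : ∃ f', f = f' + 1 := ⟨f - 1, by omega⟩
    rw [List.drop_eq_getElem_cons hjlt, findIn] at h
    have hsj : s[j] = c := by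
      by_cases hc : s[j] = c
      · exact hc
      · rw [if_neg hc] at h; simp at h
    rw [aloopA, if_pos hi]
    have hcond : ¬ s.length ≤ j := by omega
    simp only [hcond, if_false]
    rw [hti, PySem.List.pyGet?_natCast, List.getElem?_eq_getElem hjlt]
    rw [if_pos (by rw [hsj])]
    norm_num
  | succ d ihd =>
    intro j f i r hti hi hj h hf
    have hjlt : j < s.length := by
      by_contra hc
      rw [List.drop_eq_nil_of_le (by omega)] at h
      simp [findIn] at h
    obtain ⟨f', rfl⟩ : ∃ f', f = f' + 1 := ⟨f - 1, by omega⟩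
    rw [List.drop_eq_getElem_cons hjlt, findIn] at h
    have hsj : ¬ s[j] = c := by
      intro hc
      rw [if_pos hc] at h
      simp at h
    rw [if_neg hsj] at h
    have hd' : findIn c (s.drop (j+1)) = some d := by
      cases h' : findIn c (s.drop (j+1)) with
      | none => rw [h'] at h; simp at h
      | some x => rw [h'] at h; simp at h ⊢; omega
    rw [aloopA, if_pos hi]
    have hcond : ¬ s.length ≤ j := by omega
    simp only [hcond, if_false]
    rw [hti, PySem.List.pyGet?_natCast, List.getElem?_eq_getElem hjlt]
    rw [if_neg (by simp [hsj]; intro hcc; exact hsj hcc.symm)]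
    rw [ihd (j+1) f' i r hti hi (by omega) hd' (by omega)]
    have e1 : f' + 1 - (d + 1 + 1) = f' - (d + 1) := by omega
    have e2 : j + (d + 1) + 1 = j + 1 + d + 1 := by omega
    rw [e1, e2]

theorem scan_none (s t : List Char) (c : Char) : ∀ (k : Nat), ∀ (j f : Nat), ∀ (i : Nat) (r : Int),
    s.length - j = k →
    PySem.List.pyGet? t (i : Int) = some c → i < t.length → j ≤ s.length →
    findIn c (s.drop j) = none → s.length - j ≤ f →
    aloopA s t f i j r = aloopA s t (f - (s.length - j)) i s.length r := by
  intro k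
  induction k with
  | zero =>
    intro j f i r hk hti hi hj h hf
    have hj' : j = s.length := by omega
    subst hj'
    simp
  | succ k ihk =>
    intro j f i r hk hti hi hj h hf
    have hjlt : j < s.length := by omega
    obtain ⟨f', rfl⟩ : ∃ f', f = f' + 1 := ⟨f - 1, by omega⟩
    rw [List.drop_eq_getElem_cons hjlt, findIn] at h
    have hsj : ¬ s[j] = c := by
      intro hc
      rw [if_pos hc] at h
      simp at h
    rw [if_neg hsj] at h
    have h' : findIn c (s.drop (j+1)) = none := by
      cases h'' : findIn c (s.drop (j+1)) with
      | none => rfl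
      | some x => rw [h''] at h; simp at h
    rw [aloopA, if_pos hi]
    have hcond : ¬ s.length ≤ j := by omega
    simp only [hcond, if_false]
    rw [hti, PySem.List.pyGet?_natCast, List.getElem?_eq_getElem hjlt]
    rw [if_neg (by simp [hsj]; intro hcc; exact hsj hcc.symm)]
    rw [ihk (j+1) f' i r (by omega) hti hi (by omega) h' (by omega)]
    have e1 : f' + 1 - (s.length - j) = f' - (s.length - (j+1)) := by omega
    rw [e1]

theorem aloop_greedy (s t : List Char) (hall : ∀ c ∈ t, c ∈ s) :
    ∀ (k : Nat), ∀ (i j f : Nat) (r : Int), t.length - i = k → j ≤ s.length →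
    (t.length - i) * (s.length + 1) + (s.length - j) + 1 ≤ f →
    aloopA s t f i j r = greedy s (t.drop i) j r := by
  intro k
  induction k with
  | zero =>
    intro i j f r hk hj hf
    have hi : t.length ≤ i := by omega
    obtain ⟨f', rfl⟩ : ∃ f', f = f' + 1 := ⟨f - 1, by omega⟩
    rw [aloopA, if_neg (by omega), List.drop_eq_nil_of_le hi]
    rfl
  | succ k ihk =>
    intro i j f r hk hj hf
    have hi : i < t.length := by omega
    have hti : PySem.List.pyGet? t (i : Int) = some t[i] := by
      rw [PySem.List.pyGet?_natCast, List.getElem?_eq_getElem hi]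
    have hdropt : t.drop i = t[i] :: t.drop (i+1) := List.drop_eq_getElem_cons hi
    have hcs : t[i] ∈ s := hall t[i] (List.getElem_mem hi)
    have hexp : (t.length - i) * (s.length + 1) = (t.length - (i+1)) * (s.length + 1) + (s.length + 1) := by
      have h1 : t.length - i = (t.length - (i+1)) + 1 := by omega
      rw [h1]; ring
    cases h : findIn t[i] (s.drop j) with
    | some d =>
      have hd := findIn_lt_length h
      rw [List.length_drop] at hd
      rw [scan_some s t t[i] d j f i r hti hi hj h (by omega)]
      rw [hdropt, greedy, h]
      exact ihk (i+1) (j+d+1) (f - (d+1)) r (by omega) (by omega) (by omega)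
    | none =>
      have h0 : findIn t[i] s ≠ none := fun hn => (findIn_eq_none.mp hn) hcs
      obtain ⟨p, hp⟩ := Option.ne_none_iff_exists'.mp h0
      have hplen := findIn_lt_length hp
      have hS1 : 1 ≤ s.length := by omega
      rw [scan_none s t t[i] (s.length - j) j f i r rfl hti hi hj h (by omega)]
      obtain ⟨f1, hf1⟩ : ∃ f1, f - (s.length - j) = f1 + 1 := ⟨f - (s.length - j) - 1, by omega⟩
      rw [hf1, aloopA, if_pos hi]
      simp only [le_refl, if_true]
      rw [hti]
      have hs0get : PySem.List.pyGet? s ((0 : Nat) : Int) = some s[0] := by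
        rw [PySem.List.pyGet?_natCast, List.getElem?_eq_getElem (by omega : 0 < s.length)]
        rfl
      rw [hs0get]
      have hsplit : s = s[0] :: s.drop 1 := by
        have h00 : s.drop 0 = s[0] :: s.drop 1 := List.drop_eq_getElem_cons (by omega)
        rw [← h00, List.drop_zero]
      by_cases hp0 : s[0] = t[i]
      · have hpz : p = 0 := by
          rw [hsplit, findIn, if_pos hp0] at hp
          simpa using hp.symm
        rw [if_pos (by rw [hp0])]
        rw [hdropt, greedy, h, hp, hpz]
        exact ihk (i+1) (0+1) f1 (r+1) (by omega) (by omega) (by omega)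
      · have hp1 : findIn t[i] (s.drop 1) = some (p - 1) ∧ 1 ≤ p := by
          rw [hsplit, findIn, if_neg hp0] at hp
          cases h2 : findIn t[i] (s.drop 1) with
          | none => rw [h2] at hp; simp at hp
          | some x => rw [h2] at hp; simp at hp; constructor
                      · congr 1; omega
                      · omega
        rw [if_neg (by intro hcc; exact hp0 (by injection hcc with hh; exact hh.symm))]
        rw [scan_some s t t[i] (p-1) 1 f1 i (r+1) hti hi (by omega) hp1.1 (by omega)]
        have e2 : 1 + (p - 1) + 1 = p + 1 := by omega
        rw [e2, hdropt, greedy, h, hp]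
        exact ihk (i+1) (p+1) (f1 - (p-1+1)) (r+1) (by omega) (by omega) (by omega)

theorem greedy_missing (s : List Char) : ∀ (cs : List Char) (j : Nat) (r : Int),
    (∃ c ∈ cs, c ∉ s) → greedy s cs j r = -1 := by
  intro cs
  induction cs with
  | nil => intro j r ⟨c, hc, _⟩; simp at hc
  | cons a cs ih =>
    intro j r ⟨c, hc, hcs⟩
    rcases List.mem_cons.mp hc with rfl | hmem
    · have h1 : findIn c (s.drop j) = none :=
        findIn_eq_none.mpr (fun hm => hcs (List.mem_of_mem_drop hm))
      have h2 : findIn c s = none := findIn_eq_none.mpr hcs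
      rw [greedy, h1, h2]
    · cases h1 : findIn a (s.drop j) with
      | some d => rw [greedy, h1]; exact ih _ _ ⟨c, hmem, hcs⟩
      | none =>
        cases h2 : findIn a s with
        | some p => rw [greedy, h1, h2]; exact ih _ _ ⟨c, hmem, hcs⟩
        | none => rw [greedy, h1, h2]

-- ===== VERDICT (by name: the statement is the Claim_ definition above) =====
theorem alt_eq_greedy (source target : String) :
    shortest_way1_alt source target = greedy source.toList target.toList 0 1 := by
  unfold shortest_way1_alt
  have hfirst :
      (PySem.List.pyGet?
          (((PySem.List.pyRange ((source.toList.length : Int) - 1) (-1) (-1)).foldl (bstep source.toList)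
            [PySem.Dict.empty]).reverse) 0).getD PySem.Dict.empty = Dtab source.toList 0 := by
    have := nxt_get source.toList (j := 0) (by omega)
    simpa using this
  have h := bloop_greedy source.toList _ _
    (fun j hj => nxt_get source.toList hj) hfirst target.toList 0 1 (by omega)
  simpa using h

theorem shortest_way1_spec : Claim_equal_shortest_way1 := by
  intro source target _
  unfold Spec_shortest_way1
  rw [alt_eq_greedy]
  unfold shortest_way1
  by_cases hm : ∃ c ∈ target.toList, c ∉ source.toList
  · rw [if_pos (by simpa using hm), greedy_missing source.toList target.toList 0 1 hm]
  · rw [if_neg (by simpa using hm)]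
    push_neg at hm
    have h := aloop_greedy source.toList target.toList hm target.toList.length 0 0
      ((target.toList.length + 1) * (source.toList.length + 1)) 1 (by omega) (by omega)
      (by
        have hexp : (target.toList.length + 1) * (source.toList.length + 1)
            = target.toList.length * (source.toList.length + 1) + (source.toList.length + 1) := by ring
        have h2 : (target.toList.length - 0) * (source.toList.length + 1)
            = target.toList.length * (source.toList.length + 1) := by norm_num
        omega)
    simpa using h
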